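-- pv_equiv track=rewrite | github.com/MagnusCole/keywords | src/ml/clustering.py | _group_by_labels
-- ===== SOURCE A (Python) =====
-- def _group_by_labels(keywords: list[str], labels) -> dict[str, list[str]]:
--     """Group keywords by cluster labels."""
--     groups: dict[int, list[str]] = {}
--     for keyword, label in zip(keywords, labels, strict=False):
--         groups.setdefault(int(label), []).append(keyword)
--
--     # Convert to string keys sorted by cluster size
--     result = {}
--     for i, (_, members) in enumerate(sorted(groups.items(), key=lambda x: (-len(x[1]), x[0]))):
--         result[f"cluster_{i}"] = members
--
--     return result
-- ===== SOURCE B (Python) =====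
-- from itertools import groupby
--
--
-- def _group_by_labels(keywords: list[str], labels) -> dict[str, list[str]]:
--     """Group keywords by cluster labels via sort-then-groupby, relabel by size."""
--     pairs = sorted(((int(label), keyword) for keyword, label in zip(keywords, labels, strict=False)),
--                    key=lambda p: p[0])
--     groups = [(lab, [kw for _, kw in grp]) for lab, grp in groupby(pairs, key=lambda p: p[0])]
--     groups.sort(key=lambda g: (-len(g[1]), g[0]))
--     return {f"cluster_{i}": members for i, (_, members) in enumerate(groups)}
-- ===== Notes on version B (the rewrite author's own statement) =====
-- stated objective: alternative
-- what changed: Replaces A's hash-dict grouping (dict.setdefault inside the zip loop) with a sort of the (label, keyword) pairs followed by itertools.groupby over consecutive equal labels; the size-then-label resort and cluster_i renaming are unchanged.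
import Mathlib
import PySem

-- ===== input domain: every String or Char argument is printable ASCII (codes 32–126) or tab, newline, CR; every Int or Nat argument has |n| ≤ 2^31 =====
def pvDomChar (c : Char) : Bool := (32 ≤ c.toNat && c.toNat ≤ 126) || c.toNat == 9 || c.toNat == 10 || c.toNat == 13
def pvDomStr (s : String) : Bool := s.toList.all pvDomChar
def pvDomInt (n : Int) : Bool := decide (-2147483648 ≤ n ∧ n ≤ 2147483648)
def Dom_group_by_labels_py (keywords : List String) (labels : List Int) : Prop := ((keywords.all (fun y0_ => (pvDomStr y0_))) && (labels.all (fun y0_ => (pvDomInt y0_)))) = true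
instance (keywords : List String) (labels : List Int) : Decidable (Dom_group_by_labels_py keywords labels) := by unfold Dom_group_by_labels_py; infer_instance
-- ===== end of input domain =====

-- B replaces A's hash-dict grouping with sort-then-group-consecutive-runs (itertools.groupby); alternative decomposition, same cost class.

-- ===== PORT A =====
def group_by_labels_py (keywords : List String) (labels : List Int) : List (String × List String) :=
  let groups : PySem.Dict Int (List String) :=
    (List.zip keywords labels).foldl
      (fun d p => d.modify p.2 [] (fun v => v ++ [p.1])) PySem.Dict.empty
  let result : PySem.Dict String (List String) :=
    (PySem.List.enumerate
        (PySem.List.sorted2 groups.items (fun x => -(x.2.length : Int)) (fun x => x.1)) 0).foldl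
      (fun r q => r.insert ("cluster_" ++ PySem.Int.toStr q.1) q.2.2) PySem.Dict.empty
  result.items

-- ===== PORT B =====
-- itertools.groupby on the sorted pair list: group consecutive pairs with equal first component
def pyGroupRuns : List (Int × String) → List (Int × List String)
  | [] => []
  | p :: rest =>
    match pyGroupRuns rest with
    | [] => [(p.1, [p.2])]
    | (l, g) :: gs => if p.1 = l then (p.1, p.2 :: g) :: gs else (p.1, [p.2]) :: (l, g) :: gs

def group_by_labels_py_alt (keywords : List String) (labels : List Int) : List (String × List String) :=
  let pairs : List (Int × String) :=
    PySem.List.sorted ((List.zip keywords labels).map (fun p => (p.2, p.1))) (fun p => p.1)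
  let groups : List (Int × List String) :=
    PySem.List.sorted2 (pyGroupRuns pairs) (fun g => -(g.2.length : Int)) (fun g => g.1)
  ((PySem.List.enumerate groups 0).foldl
      (fun r q => r.insert ("cluster_" ++ PySem.Int.toStr q.1) q.2.2) PySem.Dict.empty).items

-- ===== PRECONDITION & SPEC =====
def Spec_group_by_labels_py (keywords : List String) (labels : List Int) (out : List (String × List String)) : Prop := out = group_by_labels_py_alt keywords labels
instance (keywords : List String) (labels : List Int) (out : List (String × List String)) : Decidable (Spec_group_by_labels_py keywords labels out) := by unfold Spec_group_by_labels_py; infer_instance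

-- ===== CLAIM (what is proved, stated in full; the proofs are below) =====
def Claim_equal_group_by_labels_py : Prop := ∀ (keywords : List String) (labels : List Int), Dom_group_by_labels_py keywords labels → Spec_group_by_labels_py keywords labels (group_by_labels_py keywords labels)

-- ===== LEMMAS AND PROOFS =====

-- a tuple key (k1 x, k2 x) in Python's sorted is the lexicographic order
lemma sorted2_eq_sortedLex {α : Type} (xs : List α) (k1 k2 : α → Int) :
    PySem.List.sorted2 xs k1 k2 false
      = PySem.List.sorted xs (fun x => toLex (k1 x, k2 x)) false := by
  have h : (fun (a b : α) => decide (k1 a < k1 b) || (!decide (k1 b < k1 a) && decide (k2 a < k2 b)))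
      = fun a b => decide (toLex (k1 a, k2 a) < toLex (k1 b, k2 b)) := by
    funext a b
    simp only [Prod.Lex.toLex_lt_toLex]
    by_cases h1 : k1 a < k1 b <;> by_cases h2 : k1 b < k1 a <;> by_cases h3 : k2 a < k2 b <;>
      simp [h1, h2, h3] <;> omega
  calc PySem.List.sorted2 xs k1 k2 false
      = List.foldl (fun acc x => PySem.List.insertBy
          (fun a b => decide (k1 a < k1 b) || (!decide (k1 b < k1 a) && decide (k2 a < k2 b))) x acc) [] xs := rfl
    _ = List.foldl (fun acc x => PySem.List.insertBy
          (fun a b => decide (toLex (k1 a, k2 a) < toLex (k1 b, k2 b))) x acc) [] xs := by rw [h]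
    _ = PySem.List.sorted xs (fun x => toLex (k1 x, k2 x)) false := rfl

-- stability of insertion: inserting x appends it behind the equal-key elements
lemma filter_insertBy {α : Type} (key : α → Int) (c : Int) (x : α) :
    ∀ acc : List α, acc.Pairwise (fun a b => key a ≤ key b) →
      (PySem.List.insertBy (fun a b => decide (key a < key b)) x acc).filter (fun y => key y == c)
        = acc.filter (fun y => key y == c) ++ (if key x = c then [x] else []) := by
  intro acc
  induction acc with
  | nil =>
    intro _
    by_cases h : key x = c <;> simp [PySem.List.insertBy, h]
  | cons y ys ih =>
    intro hp
    have hy : ∀ z ∈ ys, key y ≤ key z := fun z hz => (List.pairwise_cons.mp hp).1 z hz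
    have hys : ys.Pairwise (fun a b => key a ≤ key b) := (List.pairwise_cons.mp hp).2
    rw [PySem.List.insertBy]
    by_cases hxy : key x < key y
    · simp only [hxy, decide_true, if_true]
      by_cases hxc : key x = c
      · have hnil : (y :: ys).filter (fun z => key z == c) = [] := by
          apply List.filter_eq_nil_iff.mpr
          intro z hz
          have : key x < key z := by
            rcases List.mem_cons.mp hz with h | h
            · rw [h]; exact hxy
            · exact lt_of_lt_of_le hxy (hy z h)
          simp only [beq_iff_eq]
          intro hzc; rw [hzc, ← hxc] at this; exact lt_irrefl _ this
        simp [hnil, hxc]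
      · simp [List.filter_cons, hxc]
    · simp only [hxy, decide_false, Bool.false_eq_true, if_false]
      rw [List.filter_cons, List.filter_cons, ih hys]
      by_cases hyc : key y == c <;> simp [hyc]
-- note: the two branches above cover the order of appends

-- stability through the whole insertion sort
lemma filter_foldl_insertBy {α : Type} (key : α → Int) (c : Int) :
    ∀ (xs acc : List α), acc.Pairwise (fun a b => key a ≤ key b) →
      ((xs.foldl (fun acc x => PySem.List.insertBy (fun a b => decide (key a < key b)) x acc) acc).filter
          (fun y => key y == c))
        = acc.filter (fun y => key y == c) ++ xs.filter (fun x => key x == c) := by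
  intro xs
  induction xs with
  | nil => intro acc _; simp
  | cons x xs ih =>
    intro acc hp
    rw [List.foldl_cons, ih _ (PySem.List.insertBy_pairwise_le key x acc hp),
        filter_insertBy key c x acc hp, List.filter_cons]
    by_cases hxc : key x = c <;> simp [hxc, List.append_assoc]

lemma sorted_filter_stable (L : List (Int × String)) (c : Int) :
    (PySem.List.sorted L (fun p => p.1) false).filter (fun p => p.1 == c)
      = L.filter (fun p => p.1 == c) := by
  rw [PySem.List.sorted_eq_foldl_insertBy]
  simpa using filter_foldl_insertBy (fun p : Int × String => p.1) c L [] (by simp)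

lemma pyGroupRuns_cons (q : Int × String) (t : List (Int × String)) :
    ∃ g gs, pyGroupRuns (q :: t) = (q.1, g) :: gs := by
  cases h : pyGroupRuns t with
  | nil => exact ⟨[q.2], [], by rw [pyGroupRuns, h]⟩
  | cons a as =>
    obtain ⟨l, g⟩ := a
    by_cases he : q.1 = l
    · exact ⟨q.2 :: g, as, by rw [pyGroupRuns, h]; simp [he]⟩
    · exact ⟨[q.2], (l, g) :: as, by rw [pyGroupRuns, h]; simp [he]⟩

lemma pyGroupRuns_spec : ∀ S : List (Int × String), S.Pairwise (fun a b => a.1 ≤ b.1) →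
    ((pyGroupRuns S).map (fun g => g.1)).Nodup
    ∧ (∀ c : Int, c ∈ (pyGroupRuns S).map (fun g => g.1) ↔ c ∈ S.map (fun p => p.1))
    ∧ (∀ g ∈ pyGroupRuns S, g.2 = (S.filter (fun p => p.1 == g.1)).map (fun p => p.2)) := by
  intro S
  induction S with
  | nil => intro _; simp [pyGroupRuns]
  | cons p rest ih =>
    intro hp
    have hp1 : ∀ q ∈ rest, p.1 ≤ q.1 := fun q hq => (List.pairwise_cons.mp hp).1 q hq
    have hp2 : rest.Pairwise (fun a b => a.1 ≤ b.1) := (List.pairwise_cons.mp hp).2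
    obtain ⟨ih1, ih2, ih3⟩ := ih hp2
    cases rest with
    | nil => simp [pyGroupRuns]
    | cons q rest' =>
      obtain ⟨g', gs', hq⟩ := pyGroupRuns_cons q rest'
      rw [hq] at ih1 ih2 ih3
      have hred : pyGroupRuns (p :: q :: rest')
          = if p.1 = q.1 then (p.1, p.2 :: g') :: gs' else (p.1, [p.2]) :: (q.1, g') :: gs' := by
        rw [pyGroupRuns, hq]
      by_cases hpq : p.1 = q.1
      · rw [hred, if_pos hpq]
        refine ⟨?_, ?_, ?_⟩
        · simpa [hpq] using ih1
        · intro c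
          have h2 := ih2 c
          simp only [List.map_cons, List.mem_cons] at h2 ⊢
          rw [hpq]
          tauto
        · intro g hg
          rcases List.mem_cons.mp hg with hg | hg
          · subst hg
            have hhead := ih3 (q.1, g') (List.mem_cons_self)
            simp only at hhead
            simp [hpq, hhead]
          · have hkey : g.1 ∈ gs'.map (fun g => g.1) := List.mem_map_of_mem hg
            rw [List.map_cons] at ih1
            have hne : q.1 ≠ g.1 := fun he => (List.nodup_cons.mp ih1).1 (he ▸ hkey)
            have hpg : ¬ (p.1 = g.1) := fun h => hne (hpq.symm.trans h)
            rw [List.filter_cons, if_neg (by simpa using hpg)]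
            exact ih3 g (List.mem_cons_of_mem _ hg)
      · rw [hred, if_neg hpq]
        have hltq : p.1 < q.1 := lt_of_le_of_ne (hp1 q (List.mem_cons_self)) hpq
        have hnotin : ∀ r ∈ q :: rest', p.1 ≠ r.1 := by
          intro r hr
          rcases List.mem_cons.mp hr with h | h
          · rw [h]; exact ne_of_lt hltq
          · have : q.1 ≤ r.1 := (List.pairwise_cons.mp hp2).1 r h
            exact ne_of_lt (lt_of_lt_of_le hltq this)
        have hmemrest : ∀ c, c ∈ (q.1, g') :: gs' → c.1 ∈ (q :: rest').map (fun p => p.1) := by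
          intro c hc
          exact (ih2 c.1).mp (List.mem_map_of_mem hc)
        refine ⟨?_, ?_, ?_⟩
        · simp only [List.map_cons, List.nodup_cons] at ih1 ⊢
          refine ⟨?_, ih1⟩
          intro hmem
          simp only [List.mem_cons] at hmem
          rcases hmem with h | h
          · exact hpq h
          · have : p.1 ∈ ((q.1, g') :: gs').map (fun g => g.1) := by
              simp only [List.map_cons, List.mem_cons]; exact Or.inr h
            have hin := (ih2 p.1).mp this
            simp only [List.map_cons, List.mem_cons, List.mem_map] at hin
            rcases hin with h' | ⟨r, hr, hr'⟩
            · exact hnotin q (List.mem_cons_self) h'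
            · exact hnotin r (List.mem_cons_of_mem q hr) hr'.symm
        · intro c
          have h2 := ih2 c
          simp only [List.map_cons, List.mem_cons] at h2 ⊢
          tauto
        · intro g hg
          rcases List.mem_cons.mp hg with hg | hg
          · subst hg
            have hnil : (q :: rest').filter (fun r => r.1 == p.1) = [] := by
              apply List.filter_eq_nil_iff.mpr
              intro r hr
              simpa using fun h => hnotin r hr h.symm
            show [p.2] = List.map (fun p => p.2)
              (List.filter (fun r => r.1 == p.1) (p :: q :: rest'))
            rw [List.filter_cons, if_pos (by simp), hnil]
            simp
          · have hne : p.1 ≠ g.1 := by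
              have hkey := hmemrest g hg
              simp only [List.map_cons, List.mem_cons, List.mem_map] at hkey
              rcases hkey with h | ⟨r, hr, hr'⟩
              · exact h ▸ hnotin q (List.mem_cons_self)
              · exact hr' ▸ hnotin r (List.mem_cons_of_mem q hr)
            rw [List.filter_cons, if_neg (by simpa using hne)]
            exact ih3 g hg

-- A's grouping dict, as a map over its (deduplicated, first-occurrence-ordered) keys
lemma itemsA_eq (L : List (Int × String)) :
    (L.foldl (fun d p => d.modify p.1 [] (fun v => v ++ [p.2]))
        (PySem.Dict.empty : PySem.Dict Int (List String))).items
      = (PySem.Set.ofList (L.map (fun p => p.1))).map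
          (fun c => (c, (L.filter (fun p => p.1 == c)).map (fun p => p.2))) := by
  have hkeys : (L.foldl (fun d p => d.modify p.1 [] (fun v => v ++ [p.2]))
      (PySem.Dict.empty : PySem.Dict Int (List String))).keys
      = PySem.Set.ofList (L.map (fun p => p.1)) := by
    have h := PySem.Dict.keys_foldl_modify_key (l := L) (key := fun p => p.1)
      (d0 := ([] : List String)) (f := fun _ p v => v ++ [p.2])
      (d := (PySem.Dict.empty : PySem.Dict Int (List String)))
    simpa [PySem.Dict.keys, PySem.Dict.empty, PySem.Set.update_nil_left] using h
  have hnd : (L.foldl (fun d p => d.modify p.1 [] (fun v => v ++ [p.2]))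
      (PySem.Dict.empty : PySem.Dict Int (List String))).keys.Nodup := by
    rw [hkeys]; exact PySem.Set.nodup_ofList _
  rw [PySem.Dict.items_eq_map_keys _ hnd [], hkeys]
  apply List.map_congr_left
  intro c _
  have h := PySem.Dict.getD_foldl_modify_append L
    (PySem.Dict.empty : PySem.Dict Int (List String)) c
  simp only [h]
  simp [PySem.Dict.getD, PySem.Dict.get?, PySem.Dict.empty]

-- the central fact: A's sorted items list equals B's sorted group list
lemma sorted_groups_eq (keywords : List String) (labels : List Int) :
    PySem.List.sorted2 ((List.zip keywords labels).foldl
        (fun d p => d.modify p.2 [] (fun v => v ++ [p.1]))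
        (PySem.Dict.empty : PySem.Dict Int (List String))).items
      (fun x => -(x.2.length : Int)) (fun x => x.1)
    = PySem.List.sorted2 (pyGroupRuns (PySem.List.sorted
          ((List.zip keywords labels).map (fun p => (p.2, p.1))) (fun p => p.1)))
      (fun g => -(g.2.length : Int)) (fun g => g.1) := by
  set L : List (Int × String) := (List.zip keywords labels).map (fun p => (p.2, p.1)) with hL
  set S : List (Int × String) := PySem.List.sorted L (fun p => p.1) with hS
  have hfold : (List.zip keywords labels).foldl
      (fun d p => d.modify p.2 [] (fun v => v ++ [p.1]))
      (PySem.Dict.empty : PySem.Dict Int (List String))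
      = L.foldl (fun d p => d.modify p.1 [] (fun v => v ++ [p.2]))
          (PySem.Dict.empty : PySem.Dict Int (List String)) := by
    rw [hL, List.foldl_map]
  have hSpw : S.Pairwise (fun a b => a.1 ≤ b.1) := PySem.List.sorted_pairwise L _
  obtain ⟨hg1, hg2, hg3⟩ := pyGroupRuns_spec S hSpw
  have hSL : S.Perm L := PySem.List.sorted_perm L (fun p => p.1) false
  -- B's group list written as a map over its key list
  have hGr : pyGroupRuns S
      = ((pyGroupRuns S).map (fun g => g.1)).map
          (fun c => (c, (L.filter (fun p => p.1 == c)).map (fun p => p.2))) := by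
    rw [List.map_map]
    symm
    have : ∀ g ∈ pyGroupRuns S,
        ((fun c => (c, (L.filter (fun p => p.1 == c)).map (fun p => p.2))) ∘ (fun g => g.1)) g = g := by
      intro g hg
      have := hg3 g hg
      rw [hS, sorted_filter_stable] at this
      simp only [Function.comp]
      exact Prod.ext rfl this.symm
    rw [List.map_congr_left this]; simp
  -- the two unsorted lists are permutations of one another
  have hPerm : (L.foldl (fun d p => d.modify p.1 [] (fun v => v ++ [p.2]))
      (PySem.Dict.empty : PySem.Dict Int (List String))).items.Perm (pyGroupRuns S) := by
    rw [itemsA_eq L, hGr]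
    apply List.Perm.map
    rw [List.perm_ext_iff_of_nodup (PySem.Set.nodup_ofList _) hg1]
    intro c
    rw [PySem.Set.mem_ofList, hg2 c]
    exact ((hSL.map (fun p => p.1)).mem_iff).symm
  -- both sides sort by the same lexicographic key; keys are pairwise distinct
  rw [hfold, sorted2_eq_sortedLex, sorted2_eq_sortedLex]
  set key : Int × List String → Lex (Int × Int) :=
    fun g => toLex (-(g.2.length : Int), g.1) with hkey
  have hkeyfst : ∀ a b : Int × List String, key a = key b → a.1 = b.1 := by
    intro a b h
    have := toLex_inj.mp h
    exact congrArg Prod.snd this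
  have hRperm : (PySem.List.sorted (pyGroupRuns S) key false).Perm
      ((L.foldl (fun d p => d.modify p.1 [] (fun v => v ++ [p.2]))
        (PySem.Dict.empty : PySem.Dict Int (List String))).items) :=
    (PySem.List.sorted_perm _ _ false).trans hPerm.symm
  have hle : (PySem.List.sorted (pyGroupRuns S) key false).Pairwise
      (fun a b => key a ≤ key b) := PySem.List.sorted_pairwise _ _
  have hndR : ((PySem.List.sorted (pyGroupRuns S) key false).map (fun g => g.1)).Nodup := by
    have hp : ((PySem.List.sorted (pyGroupRuns S) key false).map (fun g => g.1)).Perm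
        ((pyGroupRuns S).map (fun g => g.1)) := (PySem.List.sorted_perm _ _ false).map _
    exact hp.nodup_iff.mpr hg1
  have hne : (PySem.List.sorted (pyGroupRuns S) key false).Pairwise
      (fun a b => a.1 ≠ b.1) := List.pairwise_map.mp hndR
  have hlt : (PySem.List.sorted (pyGroupRuns S) key false).Pairwise
      (fun a b => key a < key b) := by
    refine (hle.and hne).imp ?_
    rintro a b ⟨h1, h2⟩
    exact lt_of_le_of_ne h1 (fun h => h2 (hkeyfst a b h))
  exact PySem.List.sorted_eq_of_perm_of_pairwise_lt _ _ key hRperm hlt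

-- ===== VERDICT (by name: the statement is the Claim_ definition above) =====
theorem group_by_labels_py_spec : Claim_equal_group_by_labels_py := by
  intro keywords labels _
  unfold Spec_group_by_labels_py
  exact congrArg
    (fun X => (List.foldl (fun r q => r.insert ("cluster_" ++ PySem.Int.toStr q.1) q.2.2)
        PySem.Dict.empty (PySem.List.enumerate X 0)).items)
    (sorted_groups_eq keywords labels)
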